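-- pv_equiv track=rewrite | github.com/Aasthaengg/IBMdataset | Python_codes/p02913/s329368321.py | solve
-- ===== SOURCE A (Python) =====
-- def solve(SS):
-- 	n = len(SS)
-- 	Z = [0] * n
-- 	Z[0] = n
-- 	i, j = 1, 0
-- 	while i < n:
-- 		while (i + j < n) and (SS[j] == SS[i + j]):
-- 			j += 1
-- 		Z[i] = j
-- 		if j == 0:
-- 			i += 1
-- 			continue
-- 		else:
-- 			k = 1
-- 			while (i + k < n) and (k + Z[k] < j):
-- 				Z[i + k] = Z[k]
-- 				k += 1
-- 			i += k
-- 			j -= k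
--
-- 	out = 0
-- 	for i in range(n):
-- 		tmp = min(Z[i], i)
-- 		out = max(out, tmp)
-- 	return out
-- ===== SOURCE B (Python) =====
-- def solve(SS):
--     n = len(SS)
--     out = 0
--     for i in range(1, n):
--         j = 0
--         while i + j < n and SS[j] == SS[i + j]:
--             j += 1
--         out = max(out, min(j, i))
--     return out
-- ===== Notes on version B (the rewrite author's own statement) =====
-- stated objective: simpler
-- what changed: Replaces the linear-time Z-array construction (inner match extension plus Z-box copying loop) with a direct brute-force scan computing, for each shift i, the longest common prefix of SS and SS[i:] capped at i.
import Mathlib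
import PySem

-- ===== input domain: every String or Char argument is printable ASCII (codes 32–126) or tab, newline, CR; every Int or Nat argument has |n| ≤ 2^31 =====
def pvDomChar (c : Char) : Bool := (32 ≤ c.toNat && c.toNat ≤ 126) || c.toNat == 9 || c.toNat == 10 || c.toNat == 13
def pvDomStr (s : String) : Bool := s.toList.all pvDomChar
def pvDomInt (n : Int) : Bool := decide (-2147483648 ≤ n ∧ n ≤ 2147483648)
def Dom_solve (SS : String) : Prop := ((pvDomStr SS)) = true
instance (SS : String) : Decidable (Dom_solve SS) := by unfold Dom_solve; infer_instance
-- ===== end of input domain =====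

-- B replaces A's Z-algorithm (with its Z-box copy loop) by a direct quadratic
-- per-shift longest-common-prefix scan: simpler, not faster.
-- Loops are ported with an explicit fuel that equals the loop's decreasing measure,
-- so each recursion is structural; the fuel never runs out on the guarded path.

-- ===== PORT A =====
-- inner `while (i+j<n) and (SS[j]==SS[i+j]): j+=1`; fuel = n - (i+j)
def aScanGo (l : List Char) (i : Nat) : Nat → Nat → Nat
  | 0, j => j
  | fuel + 1, j =>
    if i + j < l.length ∧ l.getD j ' ' = l.getD (i + j) ' ' then aScanGo l i fuel (j + 1)
    else j

def aScan (l : List Char) (i j : Nat) : Nat := aScanGo l i (l.length - (i + j)) j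

-- inner `while (i+k<n) and (k+Z[k]<j): Z[i+k]=Z[k]; k+=1`, returning (Z, k); fuel = j - k
def aCopyGo (l : List Char) (i j : Nat) : Nat → List Nat → Nat → List Nat × Nat
  | 0, Z, k => (Z, k)
  | fuel + 1, Z, k =>
    if i + k < l.length ∧ k + Z.getD k 0 < j then
      aCopyGo l i j fuel (Z.set (i + k) (Z.getD k 0)) (k + 1)
    else (Z, k)

def aCopy (l : List Char) (Z : List Nat) (i j k : Nat) : List Nat × Nat :=
  aCopyGo l i j (j - k) Z k

-- outer `while i < n: …`; i grows by at least one per iteration, fuel = n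
def aLoopGo (l : List Char) : Nat → List Nat → Nat → Nat → List Nat
  | 0, Z, _, _ => Z
  | fuel + 1, Z, i, j =>
    if i < l.length then
      let j' := aScan l i j
      let Z1 := Z.set i j'
      if j' = 0 then aLoopGo l fuel Z1 (i + 1) 0
      else
        let r := aCopy l Z1 i j' 1
        aLoopGo l fuel r.1 (i + r.2) (j' - r.2)
    else Z

def solve (SS : String) : Int :=
  let l := SS.toList
  let n := l.length
  let Z0 := (List.replicate n 0).set 0 n
  let Z := aLoopGo l n Z0 1 0
  ((List.range n).foldl (fun out i => max out (min (Z.getD i 0) i)) 0 : Nat)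

-- ===== PORT B =====
-- inner `while i + j < n and SS[j] == SS[i + j]: j += 1`; fuel = n - (i+j)
def bScanGo (l : List Char) (i : Nat) : Nat → Nat → Nat
  | 0, j => j
  | fuel + 1, j =>
    if i + j < l.length ∧ l.getD j ' ' = l.getD (i + j) ' ' then bScanGo l i fuel (j + 1)
    else j

def bScan (l : List Char) (i j : Nat) : Nat := bScanGo l i (l.length - (i + j)) j

def solve_alt (SS : String) : Int :=
  let l := SS.toList
  let n := l.length
  ((List.range' 1 (n - 1)).foldl (fun out i => max out (min (bScan l i 0) i)) 0 : Nat)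

-- ===== PRECONDITION & SPEC =====
-- Pre_ excludes only the empty string, on which A raises IndexError (Z[0] = n on an empty list).
def Pre_solve (SS : String) : Prop := SS ≠ ""
instance (SS : String) : Decidable (Pre_solve SS) := by unfold Pre_solve; infer_instance
def pvWitness_solve : String := "abcab"

def Spec_solve (SS : String) (out : Int) : Prop := out = solve_alt SS
instance (SS : String) (out : Int) : Decidable (Spec_solve SS out) := by unfold Spec_solve; infer_instance

-- ===== CLAIM (what is proved, stated in full; the proofs are below) =====
def Claim_equal_solve : Prop := ∀ (SS : String), Dom_solve SS → Pre_solve SS → Spec_solve SS (solve SS)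

-- ===== LEMMAS AND PROOFS =====

-- `Mt l i j`: the first j characters of l match the j characters at offset i (all in range).
def Mt (l : List Char) (i j : Nat) : Prop :=
  i + j ≤ l.length ∧ ∀ t, t < j → l.getD t ' ' = l.getD (i + t) ' '

-- `zv l i`: the true Z-value at shift i (longest common prefix of l and its i-suffix).
def zv (l : List Char) (i : Nat) : Nat := bScan l i 0

lemma bScanGo_spec (l : List Char) (i : Nat) :
    ∀ fuel j, l.length - (i + j) ≤ fuel → Mt l i j →
      Mt l i (bScanGo l i fuel j) ∧ j ≤ bScanGo l i fuel j ∧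
        (l.length ≤ i + bScanGo l i fuel j ∨
          l.getD (bScanGo l i fuel j) ' ' ≠ l.getD (i + bScanGo l i fuel j) ' ') := by
  intro fuel
  induction fuel with
  | zero =>
    intro j hf h
    simp only [bScanGo]
    exact ⟨h, le_refl _, Or.inl (by omega)⟩
  | succ fuel ih =>
    intro j hf h
    simp only [bScanGo]
    split
    case isTrue hc =>
      have hmt : Mt l i (j + 1) := by
        obtain ⟨hb, hm⟩ := h
        refine ⟨by omega, ?_⟩
        intro t ht
        rcases Nat.lt_or_ge t j with h' | h'
        · exact hm t h'
        · have : t = j := by omega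
          subst this; exact hc.2
      obtain ⟨a, b, c⟩ := ih (j + 1) (by omega) hmt
      exact ⟨a, by omega, c⟩
    case isFalse hc =>
      refine ⟨h, le_refl _, ?_⟩
      rcases Nat.lt_or_ge (i + j) l.length with h' | h'
      · right; intro he; exact hc ⟨h', he⟩
      · left; omega

lemma bScan_spec (l : List Char) (i j : Nat) (h : Mt l i j) :
    Mt l i (bScan l i j) ∧ j ≤ bScan l i j ∧
      (l.length ≤ i + bScan l i j ∨ l.getD (bScan l i j) ' ' ≠ l.getD (i + bScan l i j) ' ') :=
  bScanGo_spec l i (l.length - (i + j)) j (le_refl _) h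

lemma Mt_unique (l : List Char) (i m m' : Nat)
    (h1 : Mt l i m) (s1 : l.length ≤ i + m ∨ l.getD m ' ' ≠ l.getD (i + m) ' ')
    (h2 : Mt l i m') (s2 : l.length ≤ i + m' ∨ l.getD m' ' ' ≠ l.getD (i + m') ' ') :
    m = m' := by
  by_contra hne
  have hb1 := h1.1
  have hb2 := h2.1
  rcases Nat.lt_or_ge m m' with h | h
  · have hm := h2.2 m h
    rcases s1 with hs | hs
    · omega
    · exact hs hm
  · have h' : m' < m := by omega
    have hm := h1.2 m' h'
    rcases s2 with hs | hs
    · omega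
    · exact hs hm

lemma zv_spec (l : List Char) (i : Nat) (hi : i ≤ l.length) :
    Mt l i (zv l i) ∧
      (l.length ≤ i + zv l i ∨ l.getD (zv l i) ' ' ≠ l.getD (i + zv l i) ' ') := by
  have := bScan_spec l i 0 ⟨by omega, by intro t ht; omega⟩
  exact ⟨this.1, this.2.2⟩

lemma bScan_from (l : List Char) (i j : Nat) (h : Mt l i j) :
    bScan l i j = zv l i := by
  have h1 := bScan_spec l i j h
  have h2 := zv_spec l i (le_trans (by omega) h.1)
  exact Mt_unique l i _ _ h1.1 h1.2.2 h2.1 h2.2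

lemma zv_from (l : List Char) (i m : Nat) (h : Mt l i m)
    (hs : l.length ≤ i + m ∨ l.getD m ' ' ≠ l.getD (i + m) ' ') :
    zv l i = m := by
  have h2 := zv_spec l i (le_trans (by omega) h.1)
  exact Mt_unique l i _ _ h2.1 h2.2 h hs

lemma aScanGo_eq_bScanGo (l : List Char) (i : Nat) :
    ∀ fuel j, aScanGo l i fuel j = bScanGo l i fuel j := by
  intro fuel
  induction fuel with
  | zero => intro j; rfl
  | succ fuel ih =>
    intro j
    simp only [aScanGo, bScanGo]
    split
    · exact ih (j + 1)
    · rfl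

lemma aScan_eq_bScan (l : List Char) (i j : Nat) : aScan l i j = bScan l i j :=
  aScanGo_eq_bScanGo l i (l.length - (i + j)) j

-- the Z-box copy rule: if k + zv l k < zv l i then zv l (i+k) = zv l k
lemma zv_copy (l : List Char) (i k : Nat) (hi : i ≤ l.length)
    (hk : k + zv l k < zv l i) : zv l (i + k) = zv l k := by
  obtain ⟨⟨hjb, hjm⟩, _⟩ := zv_spec l i hi
  set j := zv l i with hj
  have hkl : k ≤ l.length := by omega
  obtain ⟨⟨hzb, hzm⟩, hzs⟩ := zv_spec l k hkl
  set z := zv l k with hz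
  have hmt : Mt l (i + k) z := by
    refine ⟨by omega, ?_⟩
    intro t ht
    have h1 := hzm t ht
    have h2 := hjm (k + t) (by omega)
    rw [← Nat.add_assoc] at h2
    exact h1.trans h2
  refine zv_from l (i + k) z hmt ?_
  right
  have hms : l.getD z ' ' ≠ l.getD (k + z) ' ' := by
    rcases hzs with h | h
    · omega
    · exact h
  have h2 := hjm (k + z) (by omega)
  rw [← Nat.add_assoc] at h2
  rw [← h2]
  exact hms

lemma aCopyGo_spec (l : List Char) (i j : Nat) (hi : i < l.length) (hj : zv l i = j) :
    ∀ fuel k Z, j - k ≤ fuel → 1 ≤ k → k ≤ i →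
      (∀ t, 1 ≤ t → t < i + k → Z.getD t 0 = zv l t) → Z.length = l.length →
      k ≤ (aCopyGo l i j fuel Z k).2 ∧ (aCopyGo l i j fuel Z k).2 ≤ i ∧
        (aCopyGo l i j fuel Z k).1.length = l.length ∧
        (∀ t, 1 ≤ t → t < i + (aCopyGo l i j fuel Z k).2 →
          (aCopyGo l i j fuel Z k).1.getD t 0 = zv l t) ∧
        (i + (aCopyGo l i j fuel Z k).2 < l.length →
          j - (aCopyGo l i j fuel Z k).2 ≤ zv l (aCopyGo l i j fuel Z k).2) := by
  intro fuel
  induction fuel with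
  | zero =>
    intro k Z hf hk1 hki hlow hlen
    refine ⟨le_refl _, hki, hlen, hlow, ?_⟩
    intro _
    show j - k ≤ zv l k
    omega
  | succ fuel ih =>
    intro k Z hf hk1 hki hlow hlen
    have hZk : Z.getD k 0 = zv l k := hlow k hk1 (by omega)
    simp only [aCopyGo]
    split
    case isTrue hc =>
      have hklt : k < i := by
        rcases Nat.lt_or_ge k i with h | h
        · exact h
        · exfalso
          have : k = i := by omega
          subst this
          rw [hZk, hj] at hc
          omega
      have hnew : zv l (i + k) = zv l k := by
        refine zv_copy l i k (by omega) ?_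
        rw [hj, ← hZk]; exact hc.2
      have hlow' : ∀ t, 1 ≤ t → t < i + (k + 1) →
          (Z.set (i + k) (Z.getD k 0)).getD t 0 = zv l t := by
        intro t ht1 ht2
        rcases Nat.lt_or_ge t (i + k) with h | h
        · rw [List.getD_eq_getElem?_getD, List.getElem?_set_ne (by omega),
              ← List.getD_eq_getElem?_getD]
          exact hlow t ht1 h
        · have : t = i + k := by omega
          subst this
          rw [List.getD_eq_getElem?_getD, List.getElem?_set_self (by omega),
              Option.getD_some, hZk, hnew]
      obtain ⟨a, b, c, d, e⟩ := ih (k + 1) (Z.set (i + k) (Z.getD k 0))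
        (by rw [hZk] at hc; omega) (by omega) (by omega) hlow' (by simp [hlen])
      exact ⟨by omega, b, c, d, e⟩
    case isFalse hc =>
      refine ⟨le_refl _, hki, hlen, hlow, ?_⟩
      intro h
      have : ¬ (k + Z.getD k 0 < j) := fun hlt => hc ⟨h, hlt⟩
      show j - k ≤ zv l k
      omega

lemma aLoopGo_correct (l : List Char) :
    ∀ fuel i j Z, l.length - i ≤ fuel → 1 ≤ i → Z.length = l.length →
      (∀ t, 1 ≤ t → t < i → Z.getD t 0 = zv l t) →
      (i < l.length → Mt l i j) →
      ∀ t, 1 ≤ t → t < l.length → (aLoopGo l fuel Z i j).getD t 0 = zv l t := by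
  intro fuel
  induction fuel with
  | zero =>
    intro i j Z hf h1 hlen hZ hj t ht1 ht2
    exact hZ t ht1 (by omega)
  | succ fuel ih =>
    intro i j Z hf h1 hlen hZ hj t ht1 ht2
    simp only [aLoopGo]
    split
    case isTrue hi =>
      have hj' : aScan l i j = zv l i := by
        rw [aScan_eq_bScan]
        exact bScan_from l i j (hj hi)
      have hset : ∀ t, 1 ≤ t → t < i + 1 → (Z.set i (aScan l i j)).getD t 0 = zv l t := by
        intro t ht1 ht2
        rcases Nat.lt_or_ge t i with h | h
        · rw [List.getD_eq_getElem?_getD, List.getElem?_set_ne (by omega),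
              ← List.getD_eq_getElem?_getD]
          exact hZ t ht1 h
        · have : t = i := by omega
          subst this
          rw [List.getD_eq_getElem?_getD, List.getElem?_set_self (by omega),
              Option.getD_some, hj']
      split
      case isTrue h0 =>
        refine ih (i + 1) 0 _ (by omega) (by omega) (by simp [hlen]) hset ?_ t ht1 ht2
        intro h
        exact ⟨by omega, by intro s hs; omega⟩
      case isFalse h0 =>
        obtain ⟨hk1, hki, hlen', hlow', hrest⟩ :=
          aCopyGo_spec l i (aScan l i j) hi hj'.symm (aScan l i j - 1) 1
            (Z.set i (aScan l i j)) (by omega) (le_refl _) h1 hset (by simp [hlen])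
        have hac : aCopyGo l i (aScan l i j) (aScan l i j - 1) (Z.set i (aScan l i j)) 1
            = aCopy l (Z.set i (aScan l i j)) i (aScan l i j) 1 := rfl
        rw [hac] at hk1 hki hlen' hlow' hrest
        refine ih _ _ _ (by omega) (by omega) hlen' hlow' ?_ t ht1 ht2
        intro hlt
        have hrest' := hrest hlt
        obtain ⟨⟨hjb, hjm⟩, _⟩ := zv_spec l i (le_of_lt hi)
        rw [← hj'] at hjb hjm
        refine ⟨by omega, ?_⟩
        intro s hs
        have h2' := hjm ((aCopy l (Z.set i (aScan l i j)) i (aScan l i j) 1).2 + s) (by omega)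
        rw [← Nat.add_assoc] at h2'
        have hz := zv_spec l (aCopy l (Z.set i (aScan l i j)) i (aScan l i j) 1).2 (by omega)
        have h1' := hz.1.2 s (by omega)
        exact h1'.trans h2'
    case isFalse hi =>
      exact hZ t ht1 (by omega)

lemma foldl_maxmin_congr (L : List Nat) (f g : Nat → Nat) (a : Nat)
    (h : ∀ t ∈ L, f t = g t) :
    L.foldl (fun out i => max out (f i)) a = L.foldl (fun out i => max out (g i)) a := by
  induction L generalizing a with
  | nil => rfl
  | cons x xs ih =>
    simp only [List.foldl_cons]
    rw [h x (by simp)]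
    exact ih _ (fun t ht => h t (List.mem_cons_of_mem _ ht))

lemma solve_eq_aux (l : List Char) (hn : 1 ≤ l.length) :
    (List.range l.length).foldl
        (fun out i => max out (min ((aLoopGo l l.length ((List.replicate l.length 0).set 0 l.length) 1 0).getD i 0) i)) 0
      = (List.range' 1 (l.length - 1)).foldl (fun out i => max out (min (bScan l i 0) i)) 0 := by
  have hcor := aLoopGo_correct l l.length 1 0 ((List.replicate l.length 0).set 0 l.length)
    (by omega) (le_refl _) (by simp)
    (by intro t ht1 ht2; omega)
    (by intro h; exact ⟨by omega, by intro t ht; omega⟩)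
  obtain ⟨m, hm⟩ : ∃ m, l.length = m + 1 := ⟨l.length - 1, by omega⟩
  have hr : List.range l.length = 0 :: List.range' 1 (l.length - 1) := by
    rw [List.range_eq_range', hm]
    simp [List.range'_succ]
  rw [hr, List.foldl_cons]
  have h0 : max 0 (min ((aLoopGo l l.length ((List.replicate l.length 0).set 0 l.length) 1 0).getD 0 0) 0) = 0 := by
    simp
  rw [h0]
  refine foldl_maxmin_congr (List.range' 1 (l.length - 1)) _ _ 0 ?_
  intro t ht
  have hmem := List.mem_range'.mp ht
  have h1 : 1 ≤ t := by omega
  have h2 : t < l.length := by omega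
  rw [hcor t h1 h2]
  rfl

-- ===== VERDICT (by name: the statement is the Claim_ definition above) =====
theorem solve_spec : Claim_equal_solve := by
  intro SS _ hpre
  unfold Spec_solve solve solve_alt
  have hn : 1 ≤ SS.toList.length := by
    rcases Nat.eq_zero_or_pos SS.toList.length with h | h
    · exfalso
      apply hpre
      have : SS.toList = [] := List.eq_nil_of_length_eq_zero h
      exact String.ext (by simpa using this)
    · exact h
  exact congrArg Nat.cast (solve_eq_aux SS.toList hn)
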